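-- pv_equiv track=rewrite | github.com/ShuvalovAnthony/ez_python | Pavel/23/21716.py | f
-- ===== SOURCE A (Python) =====
-- def f(start, stop):
--     #                       избегаемый этап
--     if (start > stop) or (start == 56): return 0
--     if start == stop: return 1
--
--     return (
--         f(start + 3, stop) +
--         f(start + 7, stop) +
--         f(start*3, stop)
--     )
-- ===== SOURCE B (Python) =====
-- def f(start, stop):
--     # Bottom-up DP over an array indexed by s-start, filled from stop down to start.
--     if start > stop:
--         return 0
--     ways = [0] * (stop - start + 1)
--     for s in range(stop, start - 1, -1):
--         if s == 56:
--             w = 0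
--         elif s == stop:
--             w = 1
--         else:
--             w = ((ways[s + 3 - start] if s + 3 <= stop else 0)
--                  + (ways[s + 7 - start] if s + 7 <= stop else 0)
--                  + (ways[s * 3 - start] if s * 3 <= stop else 0))
--         ways[s - start] = w
--     return ways[0]
-- ===== Notes on version B (the rewrite author's own statement) =====
-- stated objective: alternative
-- what changed: Replaces A's three-way branching recursion with a bottom-up dynamic-programming array filled from stop down to start, each subresult computed once and looked up in O(1).
import Mathlib
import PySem

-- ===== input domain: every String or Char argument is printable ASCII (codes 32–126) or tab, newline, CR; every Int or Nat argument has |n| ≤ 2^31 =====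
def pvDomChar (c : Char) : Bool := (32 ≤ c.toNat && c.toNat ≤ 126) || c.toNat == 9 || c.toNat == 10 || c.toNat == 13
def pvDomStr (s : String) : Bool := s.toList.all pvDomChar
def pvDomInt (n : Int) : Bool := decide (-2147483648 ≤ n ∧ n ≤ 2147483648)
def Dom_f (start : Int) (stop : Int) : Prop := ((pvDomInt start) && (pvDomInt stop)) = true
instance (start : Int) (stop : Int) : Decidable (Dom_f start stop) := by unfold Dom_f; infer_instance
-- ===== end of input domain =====

-- B replaces A's three-way branching recursion by a bottom-up DP array filled from stop down to
-- start; return values agree on Pre_f (where A's recursion terminates).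

-- ===== PORT A =====
-- A is unbounded recursion; ported with a fuel of (stop-start).toNat + 1, which is shown sufficient
-- on Pre_f (each recursive call strictly increases start when 1 ≤ start).
def fGo : Nat → Int → Int → Int
  | 0, _, _ => 0
  | n+1, start, stop =>
    if start > stop ∨ start = 56 then 0
    else if start = stop then 1
    else fGo n (start + 3) stop + fGo n (start + 7) stop + fGo n (start * 3) stop

def f (start : Int) (stop : Int) : Int := fGo ((stop - start).toNat + 1) start stop

-- ===== PORT B =====
-- the for loop of Source B: s runs stop, stop-1, …, start, filling the array ways (index s - start);
-- fuel (stop-start).toNat + 1 counts the loop iterations exactly (0 fuel = loop finished).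
-- ways[i] reads/writes are in range on every loop iteration (start ≤ s ≤ stop and the guarded
-- offsets stay ≤ stop), so getD/setIfInBounds are exact here.
def fAltGo : Nat → Int → Int → Int → Array Int → Array Int
  | 0, _, _, _, ways => ways
  | n + 1, stop, start, s, ways =>
    if start ≤ s then
      let w : Int :=
        if s = 56 then 0
        else if s = stop then 1
        else
          (if s + 3 ≤ stop then ways.getD (s + 3 - start).toNat 0 else 0) +
          (if s + 7 ≤ stop then ways.getD (s + 7 - start).toNat 0 else 0) +
          (if s * 3 ≤ stop then ways.getD (s * 3 - start).toNat 0 else 0)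
      fAltGo n stop start (s - 1) (ways.setIfInBounds (s - start).toNat w)
    else ways

def f_alt (start : Int) (stop : Int) : Int :=
  if start > stop then 0
  else
    -- return ways[0] (the entry for start; index 0 is in range since start ≤ stop)
    (fAltGo ((stop - start).toNat + 1) stop start stop
      (Array.replicate (stop - start + 1).toNat 0)).getD 0 0

-- ===== PRECONDITION & SPEC =====
-- Pre_f excludes exactly the inputs where A's recursion never terminates (Python raises
-- RecursionError): start ≤ 0 together with start < stop, where the start*3 branch loops forever.
def Pre_f (start : Int) (stop : Int) : Prop := 1 ≤ start ∨ stop ≤ start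
instance (start : Int) (stop : Int) : Decidable (Pre_f start stop) := by unfold Pre_f; infer_instance
def pvWitness_f : Int × Int := (1, 10)

def Spec_f (start : Int) (stop : Int) (out : Int) : Prop := out = f_alt start stop
instance (start : Int) (stop : Int) (out : Int) : Decidable (Spec_f start stop out) := by unfold Spec_f; infer_instance

-- ===== CLAIM (what is proved, stated in full; the proofs are below) =====
def Claim_equal_f : Prop := ∀ (start : Int) (stop : Int), Dom_f start stop → Pre_f start stop → Spec_f start stop (f start stop)

-- ===== LEMMAS AND PROOFS =====

-- the mathematical path count (well-founded; the s ≤ 0 guard is never reached from 1 ≤ s)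
def count (stop : Int) (s : Int) : Int :=
  if s > stop ∨ s = 56 then 0
  else if s = stop then 1
  else if s ≤ 0 then 0
  else count stop (s + 3) + count stop (s + 7) + count stop (s * 3)
termination_by (stop - s).toNat
decreasing_by all_goals omega

lemma count_gt (stop v : Int) (h : stop < v) : count stop v = 0 := by
  rw [count]; simp [show v > stop from h]

lemma go_eq (stop : Int) : ∀ (n : Nat) (s : Int), 1 ≤ s → (stop - s).toNat < n →
    fGo n s stop = count stop s := by
  intro n
  induction n with
  | zero => intro s _ h; omega
  | succ n ih =>
    intro s hs hn
    rw [fGo, count]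
    by_cases h1 : s > stop ∨ s = 56
    · simp [h1]
    · simp only [h1, if_false]
      by_cases h2 : s = stop
      · simp [h2]
      · have hle : s ≤ stop - 1 := by omega
        simp only [h2, if_false, show ¬ s ≤ 0 by omega, if_false]
        rw [ih (s + 3) (by omega) (by omega), ih (s + 7) (by omega) (by omega),
            ih (s * 3) (by omega) (by omega)]

lemma getD_setIfInBounds (a : Array Int) (i j : Nat) (v : Int) (hj : j < a.size) :
    (a.setIfInBounds i v).getD j 0 = if j = i then (if i < a.size then v else a.getD j 0) else a.getD j 0 := by
  rw [Array.getD_eq_getD_getElem?, Array.getD_eq_getD_getElem?, Array.getElem?_setIfInBounds]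
  by_cases h : i = j <;> by_cases h2 : i < a.size <;>
    simp [h, hj, Array.getElem?_eq_getElem hj, eq_comm]

lemma loop_inv (stop start : Int) (h1 : 1 ≤ start) :
    ∀ (n : Nat) (s : Int) (a : Array Int), (s - start + 1).toNat = n →
      start - 1 ≤ s → s ≤ stop → a.size = (stop - start + 1).toNat →
      (∀ v : Int, start ≤ v → v ≤ stop →
        a.getD (v - start).toNat 0 = if s < v then count stop v else 0) →
      ∀ v : Int, start ≤ v → v ≤ stop →
        (fAltGo n stop start s a).getD (v - start).toNat 0 =
          if start - 1 < v then count stop v else 0 := by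
  intro n
  induction n with
  | zero =>
    intro s a hn hlo hhi hsz hinv v hv1 hv2
    have hs : s = start - 1 := by omega
    rw [fAltGo, hinv v hv1 hv2, hs]
  | succ n ih =>
    intro s a hn hlo hhi hsz hinv v hv1 hv2
    have hs : start ≤ s := by omega
    rw [fAltGo]
    simp only [hs, if_pos]
    apply ih (s - 1) _ (by omega) (by omega) (by omega)
      (by rw [Array.size_setIfInBounds, hsz]) _ v hv1 hv2
    intro u hu1 hu2
    rw [getD_setIfInBounds _ _ _ _ (by omega)]
    by_cases hu : u = s
    · rw [if_pos (by omega), if_pos (by omega), hu, if_pos (show s - 1 < s by omega)]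
      rw [count]
      by_cases h56 : s = 56
      · simp [h56, show ¬ (56 : Int) > stop by omega]
      · by_cases hst : s = stop
        · simp [hst]
        · rw [if_neg h56, if_neg hst, if_neg (show ¬ (s > stop ∨ s = 56) by omega),
              if_neg hst, if_neg (show ¬ s ≤ 0 by omega)]
          congr 1
          · congr 1
            · by_cases h3 : s + 3 ≤ stop
              · rw [if_pos h3, hinv (s + 3) (by omega) h3, if_pos (by omega)]
              · rw [if_neg h3, count_gt stop (s + 3) (by omega)]
            · by_cases h7 : s + 7 ≤ stop
              · rw [if_pos h7, hinv (s + 7) (by omega) h7, if_pos (by omega)]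
              · rw [if_neg h7, count_gt stop (s + 7) (by omega)]
          · by_cases h33 : s * 3 ≤ stop
            · rw [if_pos h33, hinv (s * 3) (by omega) h33, if_pos (by omega)]
            · rw [if_neg h33, count_gt stop (s * 3) (by omega)]
    · rw [if_neg (by omega), hinv u hu1 hu2]
      by_cases h : s < u
      · rw [if_pos h, if_pos (by omega)]
      · rw [if_neg h, if_neg (by omega)]

lemma f_alt_eq_count (start stop : Int) (h1 : 1 ≤ start) (h2 : start ≤ stop) :
    f_alt start stop = count stop start := by
  rw [f_alt]
  simp only [show ¬ start > stop by omega, if_false]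
  have h0 : (0 : Nat) = (start - start).toNat := by omega
  rw [h0, loop_inv stop start h1 ((stop - start).toNat + 1) stop _ (by omega)
      (by omega) (le_refl _) (by rw [Array.size_replicate])
      (fun v hv1 hv2 => by
        rw [show (Array.replicate (stop - start + 1).toNat (0 : Int)).getD (v - start).toNat 0 = 0 by
          simp [Array.getD]]
        rw [if_neg (by omega)])
      start (le_refl _) h2]
  rw [if_pos (by omega)]

-- ===== VERDICT (by name: the statement is the Claim_ definition above) =====
theorem f_spec : Claim_equal_f := by
  intro start stop _ hpre
  unfold Spec_f f
  by_cases hle : start ≤ stop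
  · rcases hpre with h1 | h2
    · -- 1 ≤ start ≤ stop: both sides equal count stop start
      rw [go_eq stop _ start h1 (by omega), f_alt_eq_count start stop h1 hle]
    · -- start = stop: both compute the single base case directly
      have hst : start = stop := by omega
      subst hst
      rw [f_alt]
      simp only [show ¬ start > start by omega, if_false]
      have hf : (start - start).toNat + 1 = 1 := by omega
      have hn : (start - start + 1).toNat = 1 := by omega
      rw [hf, hn, fAltGo]
      simp only [le_refl, if_pos]
      rw [fAltGo, show (start - start).toNat = 0 by omega]
      have harr : ∀ c : Int, ((Array.replicate 1 (0:Int)).setIfInBounds 0 c).getD 0 0 = c :=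
        fun c => rfl
      rw [harr, fGo]
      by_cases h56 : start = 56 <;> simp [h56]
  · -- start > stop: both return 0
    have : (stop - start).toNat + 1 = 1 := by omega
    rw [this, fGo, f_alt]
    simp [show start > stop by omega]
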